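-- pv_equiv track=rewrite | github.com/347347347/arg | page_generator.py | _get_page_title
-- ===== SOURCE A (Python) =====
-- def _get_page_title(sections):
--     for s in sections:
--         if s.get("type") == "page_title" and s.get("title"):
--             return s["title"]
--     for s in sections:
--         if s.get("title"):
--             return s["title"]
--     return "活動レポート"
-- ===== SOURCE B (Python) =====
-- def _get_page_title(sections):
--     fallback = None
--     for s in sections:
--         title = s.get("title")
--         if title:
--             if s.get("type") == "page_title":
--                 return title
--             if fallback is None:
--                 fallback = title
--     return fallback if fallback is not None else "活動レポート"
-- ===== Notes on version B (the rewrite author's own statement) =====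
-- stated objective: simpler
-- what changed: Replaced A's two full scans (first for page_title sections, then for any titled section) by a single pass that returns a titled page_title section immediately and records the first ordinary title as a fallback.
import Mathlib
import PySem

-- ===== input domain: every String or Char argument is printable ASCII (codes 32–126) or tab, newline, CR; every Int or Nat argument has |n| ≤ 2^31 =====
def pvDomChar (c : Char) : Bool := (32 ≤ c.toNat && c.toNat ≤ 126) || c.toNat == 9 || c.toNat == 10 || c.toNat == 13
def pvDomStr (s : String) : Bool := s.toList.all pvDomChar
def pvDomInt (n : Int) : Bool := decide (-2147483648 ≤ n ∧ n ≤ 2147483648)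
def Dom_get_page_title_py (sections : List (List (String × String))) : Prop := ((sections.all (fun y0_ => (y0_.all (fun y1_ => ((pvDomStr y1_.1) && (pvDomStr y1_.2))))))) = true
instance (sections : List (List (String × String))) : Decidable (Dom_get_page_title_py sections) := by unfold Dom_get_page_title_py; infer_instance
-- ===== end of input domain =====

-- B replaces A's two full scans with a single pass keeping a first-ordinary-title fallback (objective: simpler).


-- shared primitive: Python dict `.get` on the association-list representation (first match)
def pvGet : List (String × String) → String → Option String
  | [], _ => none
  | (k, v) :: rest, key => if k = key then some v else pvGet rest key

-- `s.get("title")` when truthy (a nonempty string), else none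
def truthyTitle (s : List (String × String)) : Option String :=
  match pvGet s "title" with
  | some t => if t = "" then none else some t
  | none => none

-- ===== PORT A =====
-- first loop of A: first section with type == "page_title" and a truthy title
def loopA1 : List (List (String × String)) → Option String
  | [] => none
  | s :: rest =>
    if pvGet s "type" = some "page_title" ∧ truthyTitle s ≠ none then truthyTitle s
    else loopA1 rest

-- second loop of A: first section with a truthy title
def loopA2 : List (List (String × String)) → Option String
  | [] => none
  | s :: rest =>
    match truthyTitle s with
    | some t => some t
    | none => loopA2 rest

def get_page_title_py (sections : List (List (String × String))) : String :=
  match loopA1 sections with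
  | some t => t
  | none =>
    match loopA2 sections with
    | some t => t
    | none => "活動レポート"

-- ===== PORT B =====
def altLoop : List (List (String × String)) → Option String → String
  | [], fb => fb.getD "活動レポート"
  | s :: rest, fb =>
    match truthyTitle s with
    | some t =>
      if pvGet s "type" = some "page_title" then t
      else altLoop rest (if fb = none then some t else fb)
    | none => altLoop rest fb

def get_page_title_py_alt (sections : List (List (String × String))) : String :=
  altLoop sections none

-- ===== PRECONDITION & SPEC =====
def Spec_get_page_title_py (sections : List (List (String × String))) (out : String) : Prop := out = get_page_title_py_alt sections
instance (sections : List (List (String × String))) (out : String) : Decidable (Spec_get_page_title_py sections out) := by unfold Spec_get_page_title_py; infer_instance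

-- ===== CLAIM (what is proved, stated in full; the proofs are below) =====
def Claim_equal_get_page_title_py : Prop := ∀ (sections : List (List (String × String))), Dom_get_page_title_py sections → Spec_get_page_title_py sections (get_page_title_py sections)

-- ===== LEMMAS AND PROOFS =====

-- loop invariant: B's single pass equals A's two-scan result with the recorded fallback spliced in
theorem altLoop_eq (l : List (List (String × String))) :
    ∀ fb : Option String,
      altLoop l fb =
        match loopA1 l with
        | some t => t
        | none =>
          match fb with
          | some f => f
          | none =>
            match loopA2 l with
            | some t => t
            | none => "活動レポート" := by
  induction l with
  | nil => intro fb; cases fb <;> simp [altLoop, loopA1, loopA2]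
  | cons s rest ih =>
    intro fb
    by_cases hty : pvGet s "type" = some "page_title"
    · cases ht : truthyTitle s with
      | none => simp [altLoop, loopA1, loopA2, ht, hty, ih]
      | some t => simp [altLoop, loopA1, ht, hty]
    · cases ht : truthyTitle s with
      | none => simp [altLoop, loopA1, loopA2, ht, hty, ih]
      | some t =>
        cases fb with
        | none => simp [altLoop, loopA1, loopA2, ht, hty, ih]
        | some f => simp [altLoop, loopA1, ht, hty, ih]

-- ===== VERDICT (by name: the statement is the Claim_ definition above) =====
theorem get_page_title_py_spec : Claim_equal_get_page_title_py := by
  intro sections _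
  unfold Spec_get_page_title_py get_page_title_py get_page_title_py_alt
  rw [altLoop_eq]
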